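-- pv_equiv track=rewrite | github.com/Vickholar/de-week3-advancedtesting-olajidevictor1 | order_pipeline/analyzer.py | _count_payment_statuses
-- ===== SOURCE A (Python) =====
-- from typing import List, Dict, Any
--
-- def _count_payment_statuses(data: List[Dict[str, Any]]) -> Dict[str, int]:
--     """Count orders by payment status."""
--     counts = {'paid': 0, 'pending': 0, 'refunded': 0}
--
--     for order in data:
--         status = order.get('payment_status', '').lower()
--         if status in counts:
--             counts[status] += 1
--         else:
--             # Count unknown statuses as pending
--             counts['pending'] += 1
--
--     return counts
-- ===== SOURCE B (Python) =====
-- from typing import List, Dict, Any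
--
-- def _count_payment_statuses(data: List[Dict[str, Any]]) -> Dict[str, int]:
--     """Count orders by payment status: exact counts for paid/refunded, pending as complement."""
--     paid = sum(1 for o in data if o.get('payment_status', '').lower() == 'paid')
--     refunded = sum(1 for o in data if o.get('payment_status', '').lower() == 'refunded')
--     return {'paid': paid, 'pending': len(data) - paid - refunded, 'refunded': refunded}
-- ===== Notes on version B (the rewrite author's own statement) =====
-- stated objective: simpler
-- what changed: Replaces the per-element dict-bucket classification loop with two direct equality counts (paid, refunded) and derives pending arithmetically as len(data) minus the two, exploiting that A sends every non-paid/non-refunded status to pending.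
import Mathlib
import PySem

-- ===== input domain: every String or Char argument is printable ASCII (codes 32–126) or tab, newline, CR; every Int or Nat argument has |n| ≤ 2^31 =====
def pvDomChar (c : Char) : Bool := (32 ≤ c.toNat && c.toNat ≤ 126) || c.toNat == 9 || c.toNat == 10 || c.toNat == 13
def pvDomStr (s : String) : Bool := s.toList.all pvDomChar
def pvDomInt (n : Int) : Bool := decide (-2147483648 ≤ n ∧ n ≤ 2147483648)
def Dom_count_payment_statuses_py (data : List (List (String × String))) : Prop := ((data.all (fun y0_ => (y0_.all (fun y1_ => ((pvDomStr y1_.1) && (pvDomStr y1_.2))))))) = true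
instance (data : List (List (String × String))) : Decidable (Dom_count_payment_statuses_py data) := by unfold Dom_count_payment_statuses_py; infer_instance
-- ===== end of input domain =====

-- B simplifies A by counting 'paid'/'refunded' directly and deriving 'pending' as the arithmetic complement.

-- shared accessor: order.get('payment_status', '').lower()
def pvStatusOf (order : List (String × String)) : String :=
  PySem.Str.lower (PySem.Dict.getD (PySem.Dict.mk order) "payment_status" "")

-- ===== PORT A =====
def pvStepA (counts : PySem.Dict String Int) (order : List (String × String)) : PySem.Dict String Int :=
  let status := pvStatusOf order
  if counts.contains status then counts.modify status 0 (· + 1)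
  else counts.modify "pending" 0 (· + 1)

def count_payment_statuses_py (data : List (List (String × String))) : List (String × Int) :=
  let counts : PySem.Dict String Int :=
    PySem.Dict.ofList [("paid", 0), ("pending", 0), ("refunded", 0)]
  (data.foldl pvStepA counts).items

-- ===== PORT B =====
def count_payment_statuses_py_alt (data : List (List (String × String))) : List (String × Int) :=
  let paid : Int := (data.countP (fun o => pvStatusOf o == "paid") : Int)
  let refunded : Int := (data.countP (fun o => pvStatusOf o == "refunded") : Int)
  [("paid", paid), ("pending", (data.length : Int) - paid - refunded), ("refunded", refunded)]

-- ===== PRECONDITION & SPEC =====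
def Spec_count_payment_statuses_py (data : List (List (String × String))) (out : List (String × Int)) : Prop := out = count_payment_statuses_py_alt data
instance (data : List (List (String × String))) (out : List (String × Int)) : Decidable (Spec_count_payment_statuses_py data out) := by unfold Spec_count_payment_statuses_py; infer_instance

-- ===== CLAIM (what is proved, stated in full; the proofs are below) =====
def Claim_equal_count_payment_statuses_py : Prop := ∀ (data : List (List (String × String))), Dom_count_payment_statuses_py data → Spec_count_payment_statuses_py data (count_payment_statuses_py data)

-- ===== LEMMAS AND PROOFS =====

theorem pvLoop (data : List (List (String × String))) :
    ∀ d : PySem.Dict String Int, d.keys = ["paid", "pending", "refunded"] →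
      (data.foldl pvStepA d).keys = ["paid", "pending", "refunded"]
      ∧ (data.foldl pvStepA d).getD "paid" 0
          = d.getD "paid" 0 + (data.countP (fun o => pvStatusOf o == "paid") : Int)
      ∧ (data.foldl pvStepA d).getD "refunded" 0
          = d.getD "refunded" 0 + (data.countP (fun o => pvStatusOf o == "refunded") : Int)
      ∧ (data.foldl pvStepA d).getD "pending" 0
          = d.getD "pending" 0
            + (data.countP (fun o => !(pvStatusOf o == "paid") && !(pvStatusOf o == "refunded")) : Int) := by
  induction data with
  | nil => intro d hk; simp [hk]
  | cons o rest ih =>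
    intro d hk
    have hcont : ∀ s : String, d.contains s = decide (s ∈ ["paid", "pending", "refunded"]) := by
      intro s; rw [PySem.Dict.contains_eq_decide_mem_keys, hk]
    by_cases hc : d.contains (pvStatusOf o) = true
    · have hmem : pvStatusOf o = "paid" ∨ pvStatusOf o = "pending" ∨ pvStatusOf o = "refunded" := by
        have := hcont (pvStatusOf o); rw [hc] at this
        simpa using of_decide_eq_true this.symm
      have hstep : List.foldl pvStepA d (o :: rest)
          = rest.foldl pvStepA (d.modify (pvStatusOf o) 0 (· + 1)) := by
        simp [pvStepA, hc]
      have hkeys : (d.modify (pvStatusOf o) 0 (· + 1)).keys = ["paid", "pending", "refunded"] := by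
        rw [PySem.Dict.keys_modify, PySem.Dict.keys_insert_of_contains (h := hc), hk]
      obtain ⟨ih1, ih2, ih3, ih4⟩ := ih _ hkeys
      rw [hstep]
      refine ⟨ih1, ?_, ?_, ?_⟩
      · rw [ih2, PySem.Dict.getD_modify]
        obtain h | h | h := hmem
        · simp [h]; ring
        · simp [h]
        · simp [h]
      · rw [ih3, PySem.Dict.getD_modify]
        obtain h | h | h := hmem
        · simp [h]
        · simp [h]
        · simp [h]; ring
      · rw [ih4, PySem.Dict.getD_modify]
        obtain h | h | h := hmem
        · simp [h]
        · simp [h]; ring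
        · simp [h]
    · have hne : pvStatusOf o ≠ "paid" ∧ pvStatusOf o ≠ "pending" ∧ pvStatusOf o ≠ "refunded" := by
        have := hcont (pvStatusOf o)
        rw [eq_false_of_ne_true hc] at this
        simpa using of_decide_eq_false this.symm
      have hcp : d.contains "pending" = true := by rw [hcont]; decide
      have hstep : List.foldl pvStepA d (o :: rest)
          = rest.foldl pvStepA (d.modify "pending" 0 (· + 1)) := by
        simp [pvStepA, hc]
      have hkeys : (d.modify "pending" 0 (· + 1)).keys = ["paid", "pending", "refunded"] := by
        rw [PySem.Dict.keys_modify, PySem.Dict.keys_insert_of_contains (h := hcp), hk]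
      obtain ⟨ih1, ih2, ih3, ih4⟩ := ih _ hkeys
      rw [hstep]
      refine ⟨ih1, ?_, ?_, ?_⟩
      · rw [ih2, PySem.Dict.getD_modify]
        simp [hne.1]
      · rw [ih3, PySem.Dict.getD_modify]
        simp [hne.2.2]
      · rw [ih4, PySem.Dict.getD_modify]
        simp [hne.1, hne.2.2]
        ring

theorem pvCountSplit (data : List (List (String × String))) :
    data.countP (fun o => pvStatusOf o == "paid")
      + data.countP (fun o => pvStatusOf o == "refunded")
      + data.countP (fun o => !(pvStatusOf o == "paid") && !(pvStatusOf o == "refunded"))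
    = data.length := by
  induction data with
  | nil => simp
  | cons o rest ih =>
    simp only [List.countP_cons, List.length_cons]
    by_cases h1 : (pvStatusOf o == "paid") = true
    · have h2 : (pvStatusOf o == "refunded") = false := by
        have := eq_of_beq h1; simp [this]
      simp [h1, h2]; omega
    · by_cases h2 : (pvStatusOf o == "refunded") = true
      · simp [eq_false_of_ne_true h1, h2]; omega
      · simp [eq_false_of_ne_true h1, eq_false_of_ne_true h2]; omega

theorem count_payment_statuses_py_spec : Claim_equal_count_payment_statuses_py := by
  intro data _
  unfold Spec_count_payment_statuses_py count_payment_statuses_py count_payment_statuses_py_alt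
  obtain ⟨h1, h2, h3, h4⟩ :=
    pvLoop data (PySem.Dict.ofList [("paid", 0), ("pending", 0), ("refunded", 0)]) (by decide)
  rw [PySem.Dict.items_eq_map_keys _ (by rw [h1]; decide) 0, h1]
  have hbp : (PySem.Dict.ofList [("paid", (0 : Int)), ("pending", 0), ("refunded", 0)]).getD "paid" 0 = 0 := by decide
  have hbq : (PySem.Dict.ofList [("paid", (0 : Int)), ("pending", 0), ("refunded", 0)]).getD "pending" 0 = 0 := by decide
  have hbr : (PySem.Dict.ofList [("paid", (0 : Int)), ("pending", 0), ("refunded", 0)]).getD "refunded" 0 = 0 := by decide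
  rw [hbp] at h2; rw [hbq] at h4; rw [hbr] at h3
  have hs := pvCountSplit data
  simp [h2, h3, h4]
  omega
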